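-- pv_equiv track=rewrite | github.com/JRA2002/python_problems | LEETCODE/easy/3_consecutive_odds.py | three_cons_odds
-- ===== SOURCE A (Python) =====
-- def three_cons_odds(arr: list):
--     n = len(arr)
--     count = 0
--     for i in range(n):
--
--         if arr[i]%2 != 0:
--             count += 1
--             if count == 3:
--                 return True
--         else:
--             count = 0
--
--     return False
-- ===== SOURCE B (Python) =====
-- def three_cons_odds(arr: list):
--     return any(x % 2 != 0 and y % 2 != 0 and z % 2 != 0
--                for x, y, z in zip(arr, arr[1:], arr[2:]))
-- ===== Notes on version B (the rewrite author's own statement) =====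
-- stated objective: idiomatic
-- what changed: Replaces the running-counter state machine (reset on evens, early return at 3) with a one-line sliding-window check over all adjacent triples via zip/any.
import Mathlib
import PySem

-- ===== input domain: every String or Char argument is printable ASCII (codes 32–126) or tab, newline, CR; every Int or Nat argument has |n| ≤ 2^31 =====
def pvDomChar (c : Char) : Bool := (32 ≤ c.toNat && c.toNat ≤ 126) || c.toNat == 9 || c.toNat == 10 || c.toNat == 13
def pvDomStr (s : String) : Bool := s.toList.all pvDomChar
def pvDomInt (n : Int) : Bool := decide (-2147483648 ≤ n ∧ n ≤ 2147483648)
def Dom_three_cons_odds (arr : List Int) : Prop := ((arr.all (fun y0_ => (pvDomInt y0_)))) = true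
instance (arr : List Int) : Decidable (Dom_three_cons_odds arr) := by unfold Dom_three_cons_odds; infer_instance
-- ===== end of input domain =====

-- B replaces A's running-counter state machine with a sliding-window any-over-triples; same O(n) cost (objective: idiomatic).

-- ===== PORT A =====
-- A's index loop with the `count` accumulator, as structural recursion over the list with the same state.
def three_cons_odds_goA : List Int → Int → Bool
  | [], _ => false
  | x :: xs, count =>
    if x % 2 != 0 then
      if count + 1 == 3 then true else three_cons_odds_goA xs (count + 1)
    else three_cons_odds_goA xs 0

def three_cons_odds (arr : List Int) : Bool := three_cons_odds_goA arr 0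

-- ===== PORT B =====
-- B's `any` over zip(arr, arr[1:], arr[2:]): recursion over the adjacent triples.
def three_cons_odds_goB : List Int → Bool
  | a :: b :: c :: r =>
    if a % 2 != 0 && b % 2 != 0 && c % 2 != 0 then true
    else three_cons_odds_goB (b :: c :: r)
  | _ => false

def three_cons_odds_alt (arr : List Int) : Bool := three_cons_odds_goB arr

-- ===== PRECONDITION & SPEC =====
def Spec_three_cons_odds (arr : List Int) (out : Bool) : Prop := out = three_cons_odds_alt arr
instance (arr : List Int) (out : Bool) : Decidable (Spec_three_cons_odds arr out) := by unfold Spec_three_cons_odds; infer_instance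

-- ===== CLAIM (what is proved, stated in full; the proofs are below) =====
def Claim_equal_three_cons_odds : Prop := ∀ (arr : List Int), Dom_three_cons_odds arr → Spec_three_cons_odds arr (three_cons_odds arr)

-- ===== LEMMAS AND PROOFS =====

-- dropping an even head does not change B's answer
theorem goB_cons_even (x : Int) (r : List Int) (h : (x % 2 != 0) = false) :
    three_cons_odds_goB (x :: r) = three_cons_odds_goB r := by
  match r with
  | [] => simp [three_cons_odds_goB]
  | [b] => simp [three_cons_odds_goB]
  | b :: c :: t => simp [three_cons_odds_goB, h]

-- an even second element lets B skip the head
theorem goB_second_even (b c : Int) (r : List Int) (h : (c % 2 != 0) = false) :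
    three_cons_odds_goB (b :: c :: r) = three_cons_odds_goB (c :: r) := by
  match r with
  | [] => simp [three_cons_odds_goB]
  | t0 :: t' => simp [three_cons_odds_goB, h]

theorem goA_eq_goB (xs : List Int) : three_cons_odds_goA xs 0 = three_cons_odds_goB xs := by
  match xs with
  | [] => rfl
  | [a] => by_cases ha : (a % 2 != 0) = true <;>
      simp [three_cons_odds_goA, three_cons_odds_goB, ha]
  | [a, b] =>
      by_cases ha : (a % 2 != 0) = true <;> by_cases hb : (b % 2 != 0) = true <;>
        simp [three_cons_odds_goA, three_cons_odds_goB, ha, hb]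
  | a :: b :: c :: t =>
    have ih1 := goA_eq_goB (b :: c :: t)
    have ih2 := goA_eq_goB (c :: t)
    have ih3 := goA_eq_goB t
    by_cases ha : (a % 2 != 0) = true
    · by_cases hb : (b % 2 != 0) = true
      · by_cases hc : (c % 2 != 0) = true
        · simp [three_cons_odds_goA, three_cons_odds_goB, ha, hb, hc]
        · have hc' : (c % 2 != 0) = false := by simpa using hc
          have h1 : three_cons_odds_goA (a :: b :: c :: t) 0 = three_cons_odds_goA t 0 := by
            simp [three_cons_odds_goA, ha, hb, hc']
          rw [h1, ih3, ← goB_cons_even c t hc', ← goB_second_even b c t hc']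
          have hbc : (a % 2 != 0 && b % 2 != 0 && c % 2 != 0) = false := by
            simp [hc']
          simp [three_cons_odds_goB, hbc]
      · have hb' : (b % 2 != 0) = false := by simpa using hb
        have h1 : three_cons_odds_goA (a :: b :: c :: t) 0 = three_cons_odds_goA (c :: t) 0 := by
          simp [three_cons_odds_goA, ha, hb']
        rw [h1, ih2, ← goB_cons_even b (c :: t) hb']
        have hbc : (a % 2 != 0 && b % 2 != 0 && c % 2 != 0) = false := by simp [hb']
        simp [three_cons_odds_goB, hbc]
    · have ha' : (a % 2 != 0) = false := by simpa using ha
      have h1 : three_cons_odds_goA (a :: b :: c :: t) 0 = three_cons_odds_goA (b :: c :: t) 0 := by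
        simp [three_cons_odds_goA, ha']
      rw [h1, ih1, ← goB_cons_even a (b :: c :: t) ha']

-- ===== VERDICT (by name: the statement is the Claim_ definition above) =====
theorem three_cons_odds_spec : Claim_equal_three_cons_odds := by
  intro arr _
  unfold Spec_three_cons_odds three_cons_odds three_cons_odds_alt
  exact goA_eq_goB arr
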